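-- pv_equiv track=rewrite | github.com/smucclaw/form-data-weaver | proto-form-weaver/app/lib/extract_le.py | parse_section_to_paras
-- ===== SOURCE A (Python) =====
-- def parse_section_to_paras(file_lines, start_line):
--     """Extracts sections from the file lines starting with the start_line until an unindented line or EOF.
--     Captures paragraphs as individual strings."""
--     paras = []
--     current_section = []
--     capture = False
--
--     for line in file_lines:
--         # Start capturing after the start_line
--         if start_line in line:
--             capture = True
--             continue
--
--         # Check if we've started capturing and if the line is not unindented
--         if capture:
--             if line.strip() == '' and current_section:
--                 # Empty line signifies end of current paragraph/section
--                 paras.append(' '.join(current_section).replace(' .', '.'))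
--                 current_section = []
--             elif line.startswith(' '):
--                 # Append line to current section, strip leading/trailing whitespace
--                 current_section.append(line.strip())
--             elif not line.startswith(' ') and line.strip():
--                 # Non-indented and non-empty line stops capturing
--                 break
--
--     # Capture any final section if the file didn't end with an empty line
--     if current_section:
--         paras.append(' '.join(current_section).replace(' .', '.'))
--
--     return paras
-- ===== SOURCE B (Python) =====
-- def parse_section_to_paras(file_lines, start_line):
--     # Phase 1: advance past the first line containing start_line.
--     it = iter(file_lines)
--     for line in it:
--         if start_line in line:
--             break
--     else:
--         return []
--     # Phase 2: cut out the captured region: blank or indented lines (repeated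
--     # marker lines are skipped), up to the first unindented content line.
--     region = []
--     for line in it:
--         if start_line in line:
--             continue
--         if line.strip() and not line.startswith(' '):
--             break
--         region.append(line)
--     # Phase 3: group the region: indented lines contribute their stripped text,
--     # a blank line closes the paragraph in progress.
--     paras = []
--     group = []
--     for line in region:
--         if line.strip() == '' and group:
--             paras.append(' '.join(group).replace(' .', '.'))
--             group = []
--         elif line.startswith(' '):
--             group.append(line.strip())
--     if group:
--         paras.append(' '.join(group).replace(' .', '.'))
--     return paras
-- ===== Notes on version B (the rewrite author's own statement) =====
-- stated objective: simpler
-- what changed: Replaces A's single pass with a capture flag and in-loop break/flush logic by three plain phases: find the suffix after the first marker line, cut out the captured region, then group the region into paragraphs.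
import Mathlib
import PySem

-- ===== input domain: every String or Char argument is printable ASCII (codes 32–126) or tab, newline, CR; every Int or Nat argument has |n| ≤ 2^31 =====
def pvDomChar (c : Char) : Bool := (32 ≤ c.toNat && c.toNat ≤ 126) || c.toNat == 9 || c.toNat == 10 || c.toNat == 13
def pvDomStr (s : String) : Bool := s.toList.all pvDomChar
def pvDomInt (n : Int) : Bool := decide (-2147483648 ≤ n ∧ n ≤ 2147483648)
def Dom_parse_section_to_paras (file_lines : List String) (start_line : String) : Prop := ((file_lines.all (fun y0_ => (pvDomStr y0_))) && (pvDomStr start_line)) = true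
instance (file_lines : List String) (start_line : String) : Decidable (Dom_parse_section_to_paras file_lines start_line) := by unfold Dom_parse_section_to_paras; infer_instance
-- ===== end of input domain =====

-- B is a three-phase decomposition (find marker, cut out the captured region, group it
-- into paragraphs) of A's single-pass flag state machine; objective: simpler, same cost.

-- shared by both ports: ' '.join(cur).replace(' .', '.')
def pvFlush (cur : List String) : String :=
  PySem.Str.replace (PySem.Str.join " " cur) " ." "."

-- ===== PORT A =====
-- A's single for-loop with the capture flag; break is the non-recursive final-flush case.
def pvLoopA (start_line : String) (lines paras cur : List String) (capture : Bool) : List String :=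
  match lines with
  | [] => if cur ≠ [] then paras ++ [pvFlush cur] else paras
  | line :: rest =>
    if PySem.Str.isIn start_line line then
      pvLoopA start_line rest paras cur true
    else if capture then
      if PySem.Str.strip line == "" && !cur.isEmpty then
        pvLoopA start_line rest (paras ++ [pvFlush cur]) [] capture
      else if PySem.Str.startswith line " " then
        pvLoopA start_line rest paras (cur ++ [PySem.Str.strip line]) capture
      else if !(PySem.Str.startswith line " ") && !(PySem.Str.strip line == "") then
        -- break
        if cur ≠ [] then paras ++ [pvFlush cur] else paras
      else
        pvLoopA start_line rest paras cur capture
    else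
      pvLoopA start_line rest paras cur capture

def parse_section_to_paras (file_lines : List String) (start_line : String) : List String :=
  pvLoopA start_line file_lines [] [] false

-- ===== PORT B =====
-- phase 1: the iterator after the for/else search = the suffix after the first marker line
def pvFindRest (lines : List String) (start_line : String) : Option (List String) :=
  match lines with
  | [] => none
  | line :: rest =>
    if PySem.Str.isIn start_line line then some rest else pvFindRest rest start_line

-- phase 2: the captured region
def pvRegion (lines : List String) (start_line : String) : List String :=
  match lines with
  | [] => []
  | line :: rest =>
    if PySem.Str.isIn start_line line then pvRegion rest start_line
    else if !(PySem.Str.strip line == "") && !(PySem.Str.startswith line " ") then []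
    else line :: pvRegion rest start_line

-- phase 3: group the region into paragraphs
def pvGroup (region paras group : List String) : List String :=
  match region with
  | [] => if group ≠ [] then paras ++ [pvFlush group] else paras
  | line :: rest =>
    if PySem.Str.strip line == "" && !group.isEmpty then
      pvGroup rest (paras ++ [pvFlush group]) []
    else if PySem.Str.startswith line " " then
      pvGroup rest paras (group ++ [PySem.Str.strip line])
    else
      pvGroup rest paras group

def parse_section_to_paras_alt (file_lines : List String) (start_line : String) : List String :=
  match pvFindRest file_lines start_line with
  | none => []
  | some rest => pvGroup (pvRegion rest start_line) [] []

-- ===== PRECONDITION & SPEC =====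
def Spec_parse_section_to_paras (file_lines : List String) (start_line : String) (out : List String) : Prop := out = parse_section_to_paras_alt file_lines start_line
instance (file_lines : List String) (start_line : String) (out : List String) : Decidable (Spec_parse_section_to_paras file_lines start_line out) := by unfold Spec_parse_section_to_paras; infer_instance

-- ===== CLAIM (what is proved, stated in full; the proofs are below) =====
def Claim_equal_parse_section_to_paras : Prop := ∀ (file_lines : List String) (start_line : String), Dom_parse_section_to_paras file_lines start_line → Spec_parse_section_to_paras file_lines start_line (parse_section_to_paras file_lines start_line)

-- ===== LEMMAS AND PROOFS =====

-- While capturing, A's loop computes exactly "group the region".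
theorem pvLoopA_capture (start_line : String) (lines : List String) :
    ∀ (paras cur : List String),
    pvLoopA start_line lines paras cur true = pvGroup (pvRegion lines start_line) paras cur := by
  induction lines with
  | nil => intro paras cur; rfl
  | cons line rest ih =>
    intro paras cur
    by_cases hin : PySem.Chars.isIn start_line.toList line.toList = true
    · simp [pvLoopA, pvRegion, hin, ih]
    · rw [Bool.not_eq_true] at hin
      by_cases hs : PySem.Str.strip line = ""
      · by_cases hc : cur = []
        · by_cases hw : PySem.Chars.startswith line.toList [' '] = true
          · simp [pvLoopA, pvRegion, pvGroup, hin, hs, hc, hw, ih]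
          · rw [Bool.not_eq_true] at hw
            simp [pvLoopA, pvRegion, pvGroup, hin, hs, hc, hw, ih]
        · have hne : cur.isEmpty = false := by simpa [List.isEmpty_iff] using hc
          simp [pvLoopA, pvRegion, pvGroup, hin, hs, hc, hne, ih]
      · by_cases hw : PySem.Chars.startswith line.toList [' '] = true
        · simp [pvLoopA, pvRegion, pvGroup, hin, hs, hw, ih]
        · rw [Bool.not_eq_true] at hw
          -- break on both sides: region is empty, final flush
          simp [pvLoopA, pvRegion, pvGroup, hin, hs, hw]

-- Before the marker, A's loop is B's search phase.
theorem pvLoopA_search (start_line : String) (lines : List String) :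
    pvLoopA start_line lines [] [] false = parse_section_to_paras_alt lines start_line := by
  induction lines with
  | nil => rfl
  | cons line rest ih =>
    by_cases hin : PySem.Chars.isIn start_line.toList line.toList = true
    · simp [pvLoopA, parse_section_to_paras_alt, pvFindRest, hin, pvLoopA_capture]
    · rw [Bool.not_eq_true] at hin
      simpa [pvLoopA, parse_section_to_paras_alt, pvFindRest, hin] using ih

-- ===== VERDICT (by name: the statement is the Claim_ definition above) =====
theorem parse_section_to_paras_spec : Claim_equal_parse_section_to_paras := by
  intro file_lines start_line _
  unfold Spec_parse_section_to_paras parse_section_to_paras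
  exact pvLoopA_search start_line file_lines
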